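-- pv_equiv track=rewrite | github.com/Shuvrajit9904/NLP_Assignments | Programming3/eval.py | findNER
-- ===== SOURCE A (Python) =====
-- def findNER(data, B, I):
--     out = []
--     for i in range(len(data)):
--         lineSp = data[i].split()
--         label = lineSp[0]
--         word = lineSp[-1]
--         if label == B:
--             ner = []
--             flag = 1
--             ner.append(word)
--             startind = i+1
--             ind = i+1
--             while(flag == 1 and ind < len(data)):
--                 linesp = data[ind].split()
--                 label1 = linesp[0]
--                 if label1 == I:
--                     ner.append(linesp[-1])
--                 else:
--                     flag = 0
--                 ind += 1
--             endind = ind - 1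
--             nerOnly = " ".join(ner)
--             indOnly = "".join(['[',str(startind),'-',str(endind),']'])
--             nerWind = " ".join([nerOnly,indOnly])
--             out.append(nerWind)
--     return out
-- ===== SOURCE B (Python) =====
-- def findNER(data, B, I):
--     # Single linear pass with a state machine instead of A's B-triggered nested rescans.
--     def fmt(words, start, stop):
--         return " ".join(words) + " [%d-%d]" % (start, stop)
--     out = []
--     collecting = False
--     words = []
--     start = 0
--     for j in range(len(data)):
--         sp = data[j].split()
--         label = sp[0]
--         word = sp[-1]
--         if label == B:
--             if collecting:
--                 out.append(fmt(words, start, j))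
--             collecting = True
--             words = [word]
--             start = j + 1
--         elif collecting:
--             if label == I:
--                 words.append(word)
--             else:
--                 out.append(fmt(words, start, j))
--                 collecting = False
--     if collecting:
--         out.append(fmt(words, start, len(data) - 1))
--     return out
-- ===== Notes on version B (the rewrite author's own statement) =====
-- stated objective: simpler
-- what changed: Replaced A's nested rescan (each B label starts an inner while that re-splits the following lines) by a single linear pass with a collecting/words/start state machine that splits every line exactly once.
-- outside the precondition, e.g. on findNER(['X a', 'X b'], 'X', 'X'): A returns ['a b [1-1]', 'b [2-1]'], B returns ['a [1-1]', 'b [2-1]']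
import Mathlib
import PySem

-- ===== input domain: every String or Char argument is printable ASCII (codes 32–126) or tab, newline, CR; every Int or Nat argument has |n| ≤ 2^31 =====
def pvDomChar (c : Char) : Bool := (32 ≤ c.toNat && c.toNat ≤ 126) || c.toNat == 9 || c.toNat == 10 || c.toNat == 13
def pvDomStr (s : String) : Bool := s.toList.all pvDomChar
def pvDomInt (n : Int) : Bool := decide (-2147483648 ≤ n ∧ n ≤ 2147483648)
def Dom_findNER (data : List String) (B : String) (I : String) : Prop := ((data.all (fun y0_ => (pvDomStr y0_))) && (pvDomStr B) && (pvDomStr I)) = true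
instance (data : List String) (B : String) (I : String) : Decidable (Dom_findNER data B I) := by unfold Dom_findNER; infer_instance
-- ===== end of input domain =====

-- B replaces A's B-triggered nested rescans by one linear state-machine pass (simpler, one split per line).

-- ===== PORT A =====
-- inner 'while(flag == 1 and ind < len(data))' loop of A; returns (ner, ind) at exit
def pyAScan (data : List String) (I : String) (ner : List String) (ind : Nat) : List String × Nat :=
  if h : ind < data.length then
    let linesp := PySem.Str.split₀ (data.getD ind "")
    let label1 := PySem.List.pyGetD linesp 0 ""
    if label1 == I then
      pyAScan data I (ner ++ [PySem.List.pyGetD linesp (-1) ""]) (ind + 1)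
    else
      (ner, ind + 1)   -- flag = 0; ind += 1; loop exits
  else (ner, ind)
termination_by data.length - ind

def findNER (data : List String) (B : String) (I : String) : List String :=
  (List.range data.length).foldl (fun out i =>
    let lineSp := PySem.Str.split₀ (data.getD i "")
    let label := PySem.List.pyGetD lineSp 0 ""       -- lineSp[0]; IndexError excluded by Pre_
    let word := PySem.List.pyGetD lineSp (-1) ""     -- lineSp[-1]
    if label == B then
      let r := pyAScan data I [word] (i + 1)
      let startind : Int := (i : Int) + 1
      let endind : Int := (r.2 : Int) - 1
      let nerOnly := PySem.Str.join " " r.1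
      let indOnly := PySem.Str.join "" ["[", PySem.Int.toStr startind, "-", PySem.Int.toStr endind, "]"]
      out ++ [PySem.Str.join " " [nerOnly, indOnly]]
    else out) []

-- ===== PORT B =====
-- '" ".join(words) + " [%d-%d]" % (start, stop)' of Source B
def fmtEnt (words : List String) (start stop : Int) : String :=
  PySem.Str.join " " words ++ " [" ++ PySem.Int.toStr start ++ "-" ++ PySem.Int.toStr stop ++ "]"

def findNER_alt (data : List String) (B : String) (I : String) : List String :=
  let st := (List.range data.length).foldl (fun acc j =>
    let (out, collecting, words, start) := acc
    let sp := PySem.Str.split₀ (data.getD j "")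
    let label := PySem.List.pyGetD sp 0 ""
    let word := PySem.List.pyGetD sp (-1) ""
    if label == B then
      (if collecting then out ++ [fmtEnt words start (j : Int)] else out, true, [word], (j : Int) + 1)
    else if collecting then
      if label == I then (out, true, words ++ [word], start)
      else (out ++ [fmtEnt words start (j : Int)], false, words, start)
    else acc) (([] : List String), false, ([] : List String), (0 : Int))
  if st.2.1 then st.1 ++ [fmtEnt st.2.2.1 st.2.2.2 ((data.length : Int) - 1)] else st.1

-- ===== PRECONDITION & SPEC =====
-- Pre_ excludes whitespace-only lines, on which A raises IndexError, and the degenerate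
-- tag scheme B = I, on which A's overlapping-run extraction is an accident of its rescan.
def Pre_findNER (data : List String) (B : String) (I : String) : Prop :=
  (∀ s ∈ data, PySem.Str.split₀ s ≠ []) ∧ B ≠ I
instance (data : List String) (B : String) (I : String) : Decidable (Pre_findNER data B I) := by
  unfold Pre_findNER; infer_instance

def pvWitness_findNER : List String × String × String := (["B x", "I y", "O z"], "B", "I")

def Spec_findNER (data : List String) (B : String) (I : String) (out : List String) : Prop := out = findNER_alt data B I
instance (data : List String) (B : String) (I : String) (out : List String) : Decidable (Spec_findNER data B I out) := by unfold Spec_findNER; infer_instance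

-- ===== CLAIM (what is proved, stated in full; the proofs are below) =====
def Claim_equal_findNER : Prop := ∀ (data : List String) (B : String) (I : String), Dom_findNER data B I → Pre_findNER data B I → Spec_findNER data B I (findNER data B I)

-- ===== LEMMAS AND PROOFS =====

def labelAt (data : List String) (j : Nat) : String :=
  PySem.List.pyGetD (PySem.Str.split₀ (data.getD j "")) 0 ""
def wordAt (data : List String) (j : Nat) : String :=
  PySem.List.pyGetD (PySem.Str.split₀ (data.getD j "")) (-1) ""

-- length of the maximal run of I-labelled lines starting at j
def runLen (data : List String) (I : String) (j : Nat) : Nat :=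
  if h : j < data.length then
    if labelAt data j == I then runLen data I (j + 1) + 1 else 0
  else 0
termination_by data.length - j

def wordsRun (data : List String) (I : String) (j : Nat) : List String :=
  (List.range (runLen data I j)).map (fun k => wordAt data (j + k))

def stopAt (data : List String) (I : String) (j : Nat) : Int :=
  if j + runLen data I j < data.length then ((j + runLen data I j : Nat) : Int)
  else (data.length : Int) - 1

-- the entity stream emitted from position j in state st (none = not collecting)
def ents (data : List String) (B : String) (I : String) (j : Nat)
    (st : Option (List String × Int)) : List String :=
  if h : j < data.length then
    if labelAt data j == B then
      (match st with | some (ws, s) => [fmtEnt ws s (j : Int)] | none => []) ++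
        ents data B I (j + 1) (some ([wordAt data j], (j : Int) + 1))
    else
      match st with
      | none => ents data B I (j + 1) none
      | some (ws, s) =>
        if labelAt data j == I then ents data B I (j + 1) (some (ws ++ [wordAt data j], s))
        else fmtEnt ws s (j : Int) :: ents data B I (j + 1) none
  else
    match st with
    | some (ws, s) => [fmtEnt ws s ((data.length : Int) - 1)]
    | none => []
termination_by data.length - j

theorem runLen_pos (data : List String) (I : String) (j : Nat) (h : j < data.length)
    (hI : labelAt data j = I) : runLen data I j = runLen data I (j + 1) + 1 := by
  rw [runLen]; simp [h, hI]

theorem runLen_zero (data : List String) (I : String) (j : Nat)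
    (h : ¬ j < data.length ∨ labelAt data j ≠ I) : runLen data I j = 0 := by
  rw [runLen]
  by_cases hl : j < data.length
  · have hI : labelAt data j ≠ I := by tauto
    simp [hl, beq_iff_eq, hI]
  · simp [hl]

theorem runLen_le (data : List String) (I : String) (j : Nat) (hj : j ≤ data.length) :
    j + runLen data I j ≤ data.length := by
  fun_induction runLen data I j with
  | case1 j h hI ih => omega
  | case2 j h hI => omega
  | case3 j h => omega

theorem wordsRun_nil (data : List String) (I : String) (j : Nat)
    (h : runLen data I j = 0) : wordsRun data I j = [] := by
  simp [wordsRun, h]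

theorem wordsRun_cons (data : List String) (I : String) (j : Nat) (h : j < data.length)
    (hI : labelAt data j = I) :
    wordsRun data I j = wordAt data j :: wordsRun data I (j + 1) := by
  unfold wordsRun
  rw [runLen_pos data I j h hI, List.range_succ_eq_map]
  simp [List.map_map, Function.comp]
  intro a _
  congr 1
  omega

theorem pyAScan_eq (data : List String) (I : String) (ner : List String) (j : Nat) :
    pyAScan data I ner j =
      (ner ++ wordsRun data I j,
       j + runLen data I j + (if j + runLen data I j < data.length then 1 else 0)) := by
  fun_induction pyAScan data I ner j with
  | case1 ner j h linesp label1 hI ih =>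
    have hl : labelAt data j = I := by
      simpa [labelAt, linesp, label1, beq_iff_eq] using hI
    rw [ih, wordsRun_cons data I j h hl, runLen_pos data I j h hl]
    have e : j + (runLen data I (j + 1) + 1) = j + 1 + runLen data I (j + 1) := by omega
    rw [e]
    simp [wordAt, linesp]
  | case2 ner j h linesp label1 hI =>
    have hl : labelAt data j ≠ I := by
      simpa [labelAt, linesp, label1, beq_iff_eq] using hI
    have h0 : runLen data I j = 0 := runLen_zero data I j (Or.inr hl)
    simp [h0, wordsRun_nil data I j h0, h]
  | case3 ner j h =>
    have h0 : runLen data I j = 0 := runLen_zero data I j (Or.inl h)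
    simp [h0, wordsRun_nil data I j h0, h]

theorem fmt_eq (ws : List String) (s e : Int) :
    PySem.Str.join " " [PySem.Str.join " " ws,
      PySem.Str.join "" ["[", PySem.Int.toStr s, "-", PySem.Int.toStr e, "]"]] = fmtEnt ws s e := by
  apply String.toList_inj.mp
  simp [fmtEnt, PySem.Str.toList_join, PySem.Chars.join, List.intercalate, List.intersperse]

theorem ents_none_ge (data : List String) (B I : String) (j : Nat) (h : data.length ≤ j) :
    ents data B I j none = [] := by
  rw [ents]
  simp [Nat.not_lt.mpr h]

theorem ents_none_step_B (data : List String) (B I : String) (j : Nat) (h : j < data.length)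
    (hB : labelAt data j = B) :
    ents data B I j none = ents data B I (j + 1) (some ([wordAt data j], (j : Int) + 1)) := by
  conv_lhs => rw [ents]
  simp [h, hB]

theorem ents_none_step_nB (data : List String) (B I : String) (j : Nat) (h : j < data.length)
    (hB : labelAt data j ≠ B) :
    ents data B I j none = ents data B I (j + 1) none := by
  conv_lhs => rw [ents]
  simp [h, beq_iff_eq, hB]

theorem endind_eq (data : List String) (I : String) (j : Nat) (hj : j ≤ data.length) :
    ((j + runLen data I j + (if j + runLen data I j < data.length then 1 else 0) : Nat) : Int) - 1
      = stopAt data I j := by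
  have hle := runLen_le data I j hj
  by_cases hk : j + runLen data I j < data.length
  · simp [stopAt, hk]
  · have : j + runLen data I j = data.length := by omega
    simp [stopAt, hk, this]

theorem ents_open (data : List String) (B I : String) (hBI : B ≠ I) :
    ∀ (m j : Nat), data.length ≤ j + m → j ≤ data.length → ∀ (ws : List String) (s : Int),
    ents data B I j (some (ws, s)) =
      fmtEnt (ws ++ wordsRun data I j) s (stopAt data I j) ::
        ents data B I (j + runLen data I j) none := by
  intro m
  induction m with
  | zero =>
    intro j hm hj ws s
    have hjn : j = data.length := by omega
    subst hjn
    have h0 : runLen data I data.length = 0 := runLen_zero data I _ (Or.inl (by omega))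
    rw [ents]
    simp [h0, wordsRun_nil data I _ h0, stopAt, ents_none_ge data B I data.length le_rfl]
  | succ m ih =>
    intro j hm hj ws s
    by_cases h : j < data.length
    · by_cases hB : labelAt data j = B
      · have hnI : labelAt data j ≠ I := by rw [hB]; exact hBI
        have h0 : runLen data I j = 0 := runLen_zero data I j (Or.inr hnI)
        rw [ents]
        simp only [h, dif_pos, hB, beq_self_eq_true, if_pos]
        rw [show j + runLen data I j = j by omega,
            ents_none_step_B data B I j h hB,
            wordsRun_nil data I j h0]
        simp [stopAt, h0, h]
      · by_cases hI : labelAt data j = I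
        · have hr := runLen_pos data I j h hI
          rw [ents]
          have hBne : (labelAt data j == B) = false := by simp [beq_iff_eq, hB]
          simp only [h, dif_pos, hBne, Bool.false_eq_true, if_false, hI, beq_self_eq_true, if_pos]
          rw [ih (j + 1) (by omega) (by omega) (ws ++ [wordAt data j]) s]
          rw [wordsRun_cons data I j h hI]
          have hstop : stopAt data I j = stopAt data I (j + 1) := by
            simp only [stopAt, hr]
            rw [show j + (runLen data I (j + 1) + 1) = j + 1 + runLen data I (j + 1) by omega]
          rw [hstop, hr,
              show j + (runLen data I (j + 1) + 1) = j + 1 + runLen data I (j + 1) by omega]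
          simp [Ne.symm hBI]
        · have h0 : runLen data I j = 0 := runLen_zero data I j (Or.inr hI)
          rw [ents]
          have hBne : (labelAt data j == B) = false := by simp [beq_iff_eq, hB]
          have hIne : (labelAt data j == I) = false := by simp [beq_iff_eq, hI]
          simp only [h, dif_pos, hBne, Bool.false_eq_true, if_false, hIne]
          rw [show j + runLen data I j = j by omega,
              ents_none_step_nB data B I j h hB,
              wordsRun_nil data I j h0]
          simp [stopAt, h0, h]
    · have hjn : j = data.length := by omega
      subst hjn
      have h0 : runLen data I data.length = 0 := runLen_zero data I _ (Or.inl (by omega))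
      rw [ents]
      simp [h0, wordsRun_nil data I _ h0, stopAt, ents_none_ge data B I data.length le_rfl]

theorem ents_skip (data : List String) (B I : String) (hBI : B ≠ I) (j : Nat) :
    ents data B I (j + runLen data I j) none = ents data B I j none := by
  fun_induction runLen data I j with
  | case1 j h hI ih =>
    have hl : labelAt data j = I := by simpa [beq_iff_eq] using hI
    have hB : labelAt data j ≠ B := by rw [hl]; exact fun hc => hBI hc.symm
    rw [show j + (runLen data I (j + 1) + 1) = (j + 1) + runLen data I (j + 1) by omega, ih]
    exact (ents_none_step_nB data B I j h hB).symm
  | case2 j h hI => rfl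
  | case3 j h => rfl

theorem foldA_eq (data : List String) (B I : String) (hBI : B ≠ I) :
    ∀ (m j : Nat), j + m = data.length → ∀ (out : List String),
      (List.range' j m).foldl (fun out i =>
        let lineSp := PySem.Str.split₀ (data.getD i "")
        let label := PySem.List.pyGetD lineSp 0 ""
        let word := PySem.List.pyGetD lineSp (-1) ""
        if label == B then
          let r := pyAScan data I [word] (i + 1)
          let startind : Int := (i : Int) + 1
          let endind : Int := (r.2 : Int) - 1
          let nerOnly := PySem.Str.join " " r.1
          let indOnly := PySem.Str.join "" ["[", PySem.Int.toStr startind, "-", PySem.Int.toStr endind, "]"]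
          out ++ [PySem.Str.join " " [nerOnly, indOnly]]
        else out) out
      = out ++ ents data B I j none := by
  intro m
  induction m with
  | zero =>
    intro j hm out
    simp [ents_none_ge data B I j (by omega)]
  | succ m ih =>
    intro j hm out
    have h : j < data.length := by omega
    rw [List.range'_succ, List.foldl_cons]
    by_cases hB : labelAt data j = B
    · have hBe : ((PySem.List.pyGetD (PySem.Str.split₀ (data.getD j "")) 0 "") == B) = true := by
        simpa [labelAt, beq_iff_eq] using hB
      simp only [hBe, if_pos]
      rw [ih (j + 1) (by omega)]
      rw [pyAScan_eq data I _ (j + 1), fmt_eq, endind_eq data I (j + 1) (by omega)]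
      rw [ents_none_step_B data B I j h hB,
          ents_open data B I hBI (data.length - (j + 1)) (j + 1) (by omega) (by omega)
            [wordAt data j] ((j : Int) + 1),
          ents_skip data B I hBI (j + 1)]
      simp [wordAt]
    · have hBe : ((PySem.List.pyGetD (PySem.Str.split₀ (data.getD j "")) 0 "") == B) = false := by
        simpa [labelAt, beq_iff_eq] using hB
      simp only [hBe, Bool.false_eq_true, if_false]
      rw [ih (j + 1) (by omega), ents_none_step_nB data B I j h hB]

theorem ents_some_ge (data : List String) (B I : String) (j : Nat) (h : data.length ≤ j)
    (ws : List String) (s : Int) :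
    ents data B I j (some (ws, s)) = [fmtEnt ws s ((data.length : Int) - 1)] := by
  rw [ents]
  simp [Nat.not_lt.mpr h]

theorem ents_some_step_B (data : List String) (B I : String) (j : Nat) (h : j < data.length)
    (hB : labelAt data j = B) (ws : List String) (s : Int) :
    ents data B I j (some (ws, s)) =
      fmtEnt ws s (j : Int) :: ents data B I (j + 1) (some ([wordAt data j], (j : Int) + 1)) := by
  conv_lhs => rw [ents]
  simp [h, hB]

theorem ents_some_step_I (data : List String) (B I : String) (j : Nat) (h : j < data.length)
    (hB : labelAt data j ≠ B) (hI : labelAt data j = I) (ws : List String) (s : Int) :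
    ents data B I j (some (ws, s)) =
      ents data B I (j + 1) (some (ws ++ [wordAt data j], s)) := by
  conv_lhs => rw [ents]
  simp [h, beq_iff_eq, hB, hI]
  intro hc
  exact absurd (hI.trans hc) hB

theorem ents_some_step_O (data : List String) (B I : String) (j : Nat) (h : j < data.length)
    (hB : labelAt data j ≠ B) (hI : labelAt data j ≠ I) (ws : List String) (s : Int) :
    ents data B I j (some (ws, s)) =
      fmtEnt ws s (j : Int) :: ents data B I (j + 1) none := by
  conv_lhs => rw [ents]
  simp [h, beq_iff_eq, hB, hI]

theorem foldB_eq (data : List String) (B I : String) :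
    ∀ (m j : Nat), j + m = data.length →
      ∀ (out : List String) (c : Bool) (ws : List String) (s : Int),
      (let st := (List.range' j m).foldl (fun acc j =>
        let (out, collecting, words, start) := acc
        let sp := PySem.Str.split₀ (data.getD j "")
        let label := PySem.List.pyGetD sp 0 ""
        let word := PySem.List.pyGetD sp (-1) ""
        if label == B then
          (if collecting then out ++ [fmtEnt words start (j : Int)] else out, true, [word], (j : Int) + 1)
        else if collecting then
          if label == I then (out, true, words ++ [word], start)
          else (out ++ [fmtEnt words start (j : Int)], false, words, start)
        else acc) (out, c, ws, s)
       if st.2.1 then st.1 ++ [fmtEnt st.2.2.1 st.2.2.2 ((data.length : Int) - 1)] else st.1)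
      = out ++ ents data B I j (if c then some (ws, s) else none) := by
  intro m
  induction m with
  | zero =>
    intro j hm out c ws s
    cases c with
    | true => simp [ents_some_ge data B I j (by omega)]
    | false => simp [ents_none_ge data B I j (by omega)]
  | succ m ih =>
    intro j hm out c ws s
    have h : j < data.length := by omega
    rw [List.range'_succ, List.foldl_cons]
    by_cases hB : labelAt data j = B
    · have hBe : ((PySem.List.pyGetD (PySem.Str.split₀ (data.getD j "")) 0 "") == B) = true := by
        simpa [labelAt, beq_iff_eq] using hB
      simp only [hBe, if_pos]
      cases c with
      | true =>
        simp only [if_true]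
        rw [ih (j + 1) (by omega)]
        rw [ents_some_step_B data B I j h hB ws s]
        simp [wordAt]
      | false =>
        simp only [Bool.false_eq_true, if_false]
        rw [ih (j + 1) (by omega)]
        rw [ents_none_step_B data B I j h hB]
        simp [wordAt]
    · have hBe : ((PySem.List.pyGetD (PySem.Str.split₀ (data.getD j "")) 0 "") == B) = false := by
        simpa [labelAt, beq_iff_eq] using hB
      by_cases hI : labelAt data j = I
      · have hIe : ((PySem.List.pyGetD (PySem.Str.split₀ (data.getD j "")) 0 "") == I) = true := by
          simpa [labelAt, beq_iff_eq] using hI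
        simp only [hBe, Bool.false_eq_true, if_false, hIe]
        cases c with
        | true =>
          simp only [if_pos, if_true]
          rw [ih (j + 1) (by omega)]
          rw [ents_some_step_I data B I j h hB hI ws s]
          simp [wordAt]
        | false =>
          simp only [Bool.false_eq_true, if_false]
          rw [ih (j + 1) (by omega)]
          rw [ents_none_step_nB data B I j h hB]
          simp
      · have hIe : ((PySem.List.pyGetD (PySem.Str.split₀ (data.getD j "")) 0 "") == I) = false := by
          simpa [labelAt, beq_iff_eq] using hI
        simp only [hBe, Bool.false_eq_true, if_false, hIe]
        cases c with
        | true =>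
          simp only [if_true]
          rw [ih (j + 1) (by omega)]
          rw [ents_some_step_O data B I j h hB hI ws s]
          simp
        | false =>
          simp only [Bool.false_eq_true, if_false]
          rw [ih (j + 1) (by omega)]
          rw [ents_none_step_nB data B I j h hB]
          simp

-- ===== VERDICT (by name: the statement is the Claim_ definition above) =====
theorem findNER_spec : Claim_equal_findNER := by
  intro data B I _hdom hpre
  unfold Spec_findNER findNER findNER_alt
  rw [show List.range data.length = List.range' 0 data.length by simp [List.range_eq_range']]
  rw [foldA_eq data B I hpre.2 data.length 0 (by omega)]
  rw [foldB_eq data B I data.length 0 (by omega)]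
  simp
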